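-- pv_equiv track=rewrite | github.com/pypi-data/pypi-mirror-401 | packages/dl-backtrace/dl_backtrace-0.1.7-py3-none-any.whl/dl_backtrace/pytorch_backtrace/dlbacktrace/core/token_relevance_visuals.py | _find_input_key
-- ===== SOURCE A (Python) =====
-- def _find_input_key(rel_dict, preferred="input_ids"):
--     """Identify the correct key for input relevance tensors."""
--     if preferred in rel_dict:
--         return preferred
--     candidates = [k for k in rel_dict.keys() if isinstance(k, str)]
--     for key in ("input_ids", "inputs", "input", "tokens", "embedding_input", "input_embeds"):
--         for k in candidates:
--             if key in k.lower():
--                 return k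
--     return next(iter(rel_dict.keys()))
-- ===== SOURCE B (Python) =====
-- def _find_input_key(rel_dict, preferred="input_ids"):
--     """Identify the correct key for input relevance tensors."""
--     if preferred in rel_dict:
--         return preferred
--     names = ("input_ids", "inputs", "input", "tokens", "embedding_input", "input_embeds")
--     best = [None] * len(names)
--     for k in rel_dict.keys():
--         if isinstance(k, str):
--             kl = k.lower()
--             for i, name in enumerate(names):
--                 if best[i] is None and name in kl:
--                     best[i] = k
--     for b in best:
--         if b is not None:
--             return b
--     return next(iter(rel_dict.keys()))
-- ===== Notes on version B (the rewrite author's own statement) =====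
-- stated objective: alternative
-- what changed: B replaces A's six passes over the key list (one per candidate name) with a single pass over the keys that fills a per-priority best-match table, then returns the lowest-priority recorded key.
-- outside the precondition, e.g. on _find_input_key({}, 'input_ids'): A raises StopIteration, B raises StopIteration
import Mathlib
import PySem

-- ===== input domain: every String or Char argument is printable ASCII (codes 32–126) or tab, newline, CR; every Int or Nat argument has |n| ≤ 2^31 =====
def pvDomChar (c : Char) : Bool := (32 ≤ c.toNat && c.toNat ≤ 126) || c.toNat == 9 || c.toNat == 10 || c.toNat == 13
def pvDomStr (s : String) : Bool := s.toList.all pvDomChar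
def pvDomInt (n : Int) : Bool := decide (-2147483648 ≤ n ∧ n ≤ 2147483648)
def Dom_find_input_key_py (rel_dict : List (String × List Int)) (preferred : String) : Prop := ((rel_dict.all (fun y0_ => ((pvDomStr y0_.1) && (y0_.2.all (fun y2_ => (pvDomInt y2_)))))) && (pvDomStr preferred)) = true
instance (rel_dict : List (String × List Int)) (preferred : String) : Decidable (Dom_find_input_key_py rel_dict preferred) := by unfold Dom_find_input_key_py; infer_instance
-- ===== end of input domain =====

-- B replaces A's six passes over the key list (one per candidate name) by a single pass over the
-- keys that fills a per-priority best-match table, then returns the lowest-priority recorded key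
-- (objective: alternative; same cost).


-- ===== PORT A =====
-- the tuple of candidate names in A's source order
def pvNamesA : List String := ["input_ids", "inputs", "input", "tokens", "embedding_input", "input_embeds"]

-- A's nested loop: for key in names: for k in candidates: if key in k.lower(): return k
def pvALoop : List String → List String → Option String
  | [], _ => none
  | key :: rest, cands =>
    match cands.find? (fun k => PySem.Str.isIn key (PySem.Str.lower k)) with
    | some k => some k
    | none => pvALoop rest cands

def find_input_key_py (rel_dict : List (String × List Int)) (preferred : String) : String :=
  if (rel_dict.map Prod.fst).contains preferred then preferred
  else
    -- candidates = [k for k in rel_dict.keys() if isinstance(k, str)]; every key is a String here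
    let candidates := (rel_dict.map Prod.fst).filter (fun _ => true)
    match pvALoop pvNamesA candidates with
    | some k => k
    -- next(iter(rel_dict.keys())): raises StopIteration on an empty dict (excluded by Pre_)
    | none => ((rel_dict.map Prod.fst).head?).getD ""

-- ===== PORT B =====
def pvNamesB : List String := ["input_ids", "inputs", "input", "tokens", "embedding_input", "input_embeds"]

-- the inner loop of B: for i, name in enumerate(names): if best[i] is None and name in kl: best[i] = k
def pvBStep (best : List (Option String)) (k : String) : List (Option String) :=
  let kl := PySem.Str.lower k
  (best.zip pvNamesB).map (fun p => if p.1.isNone && PySem.Str.isIn p.2 kl then some k else p.1)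

def find_input_key_py_alt (rel_dict : List (String × List Int)) (preferred : String) : String :=
  if (rel_dict.map Prod.fst).contains preferred then preferred
  else
    let best := (rel_dict.map Prod.fst).foldl pvBStep (pvNamesB.map (fun _ => (none : Option String)))
    match (best.filterMap id).head? with
    | some k => k
    -- next(iter(rel_dict.keys())): raises StopIteration on an empty dict (excluded by Pre_)
    | none => ((rel_dict.map Prod.fst).head?).getD ""

-- ===== PRECONDITION & SPEC =====
-- A raises StopIteration (next on an empty iterator) when rel_dict is empty and preferred is absent
-- (i.e. rel_dict = []); B raises there too, so the empty dict is excluded.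
def Pre_find_input_key_py (rel_dict : List (String × List Int)) (preferred : String) : Prop := rel_dict ≠ []
instance (rel_dict : List (String × List Int)) (preferred : String) : Decidable (Pre_find_input_key_py rel_dict preferred) := by unfold Pre_find_input_key_py; infer_instance

def pvWitness_find_input_key_py : (List (String × List Int)) × String := ([("x", [1])], "y")

def Spec_find_input_key_py (rel_dict : List (String × List Int)) (preferred : String) (out : String) : Prop := out = find_input_key_py_alt rel_dict preferred
instance (rel_dict : List (String × List Int)) (preferred : String) (out : String) : Decidable (Spec_find_input_key_py rel_dict preferred out) := by unfold Spec_find_input_key_py; infer_instance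

-- ===== CLAIM (what is proved, stated in full; the proofs are below) =====
def Claim_equal_find_input_key_py : Prop := ∀ (rel_dict : List (String × List Int)) (preferred : String), Dom_find_input_key_py rel_dict preferred → Pre_find_input_key_py rel_dict preferred → Spec_find_input_key_py rel_dict preferred (find_input_key_py rel_dict preferred)

-- ===== LEMMAS AND PROOFS =====

theorem pvZipMapSelf {A B : Type} (f : A → B) (l : List A) :
    (l.map f).zip l = l.map (fun x => (f x, x)) := by
  induction l with
  | nil => rfl
  | cons a l ih => simp [ih]

-- one B step, applied to a table of first matches over `acc`, yields the table over `acc ++ [k]`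
theorem pvBStep_eq (acc : List String) (k : String) :
    pvBStep (pvNamesB.map (fun n => acc.find? (fun x => PySem.Str.isIn n (PySem.Str.lower x)))) k =
      pvNamesB.map (fun n => (acc ++ [k]).find? (fun x => PySem.Str.isIn n (PySem.Str.lower x))) := by
  simp only [pvBStep]
  rw [pvZipMapSelf, List.map_map]
  apply List.map_congr_left
  intro n _
  simp only [Function.comp]
  rw [List.find?_append]
  cases h : acc.find? (fun x => PySem.Str.isIn n (PySem.Str.lower x)) with
  | some a => simp
  | none =>
    cases hk : PySem.Str.isIn n (PySem.Str.lower k) with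
    | true => simp at hk; simp [List.find?, hk]
    | false => simp at hk; simp [List.find?, hk]

-- B's fold over the keys computes, for each name, the first key containing it
theorem pvFold_eq (ks acc : List String) :
    ks.foldl pvBStep (pvNamesB.map (fun n => acc.find? (fun x => PySem.Str.isIn n (PySem.Str.lower x)))) =
      pvNamesB.map (fun n => (acc ++ ks).find? (fun x => PySem.Str.isIn n (PySem.Str.lower x))) := by
  induction ks generalizing acc with
  | nil => simp
  | cons k ks ih =>
    rw [List.foldl_cons, pvBStep_eq, ih]
    simp

-- A's nested loop returns the first defined entry of the same table
theorem pvALoop_eq (names cands : List String) :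
    pvALoop names cands =
      ((names.map (fun n => cands.find? (fun x => PySem.Str.isIn n (PySem.Str.lower x)))).filterMap id).head? := by
  induction names with
  | nil => simp [pvALoop]
  | cons n rest ih =>
    rw [List.map_cons, List.filterMap_cons]
    simp only [pvALoop]
    cases h : cands.find? (fun x => PySem.Str.isIn n (PySem.Str.lower x)) with
    | none => simpa using ih
    | some a => simp

-- ===== VERDICT (by name: the statement is the Claim_ definition above) =====
theorem find_input_key_py_spec : Claim_equal_find_input_key_py := by
  intro rel_dict preferred _ _
  unfold Spec_find_input_key_py
  simp only [find_input_key_py, find_input_key_py_alt]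
  by_cases hp : (rel_dict.map Prod.fst).contains preferred = true
  · rw [if_pos hp, if_pos hp]
  · rw [if_neg hp, if_neg hp]
    have hb := pvFold_eq (rel_dict.map Prod.fst) []
    rw [show (pvNamesB.map fun n => ([] : List String).find? (fun x => PySem.Str.isIn n (PySem.Str.lower x)))
          = pvNamesB.map (fun _ => (none : Option String)) from by simp [List.find?],
        List.nil_append] at hb
    rw [hb, show (rel_dict.map Prod.fst).filter (fun _ => true) = rel_dict.map Prod.fst from by simp,
        pvALoop_eq]
    rfl
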